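-- pv_equiv track=rewrite | github.com/ssk241-art/Ora2S3 | final_ora2s3_framework.py | normalize_filename_for_counts
-- ===== SOURCE A (Python) =====
-- def normalize_filename_for_counts(filename: str) -> str:
--     """Strip compression/encryption suffixes to map final artifact -> base extract/split filename."""
--     f = filename or ""
--     # encryption first
--     for suf in (".gpg", ".pgp"):
--         if f.lower().endswith(suf):
--             f = f[: -len(suf)]
--             break
--     # compression
--     for suf in (".gz", ".bz2", ".zip"):
--         if f.lower().endswith(suf):
--             f = f[: -len(suf)]
--             break
--     return f
-- ===== SOURCE B (Python) =====
-- # B: single longest-match against a precomputed table of combined suffixes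
-- # (compression x encryption products), stripping once, instead of A's two
-- # staged strip loops. Correct because the combined suffixes are mutually
-- # exclusive except by containment, so the longest match is exactly the
-- # [compression][encryption] tail A removes in its two stages.
-- _COMBINED_SUFFIXES = (
--     ".bz2.gpg", ".bz2.pgp", ".zip.gpg", ".zip.pgp",
--     ".gz.gpg", ".gz.pgp",
--     ".bz2", ".zip", ".gpg", ".pgp", ".gz",
-- )
--
-- def normalize_filename_for_counts(filename: str) -> str:
--     """Strip compression/encryption suffixes to map final artifact -> base extract/split filename."""
--     f = filename or ""
--     low = f.lower()
--     for suf in _COMBINED_SUFFIXES: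
--         if low.endswith(suf):
--             return f[: len(f) - len(suf)]
--     return f
-- ===== Notes on version B (the rewrite author's own statement) =====
-- stated objective: alternative
-- what changed: A strips suffixes in two staged loops (encryption then compression, each re-lowering and slicing); B precomputes the product table of combined [compression][encryption] suffixes, finds the single longest match against the lowered string, and strips once.
import Mathlib
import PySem

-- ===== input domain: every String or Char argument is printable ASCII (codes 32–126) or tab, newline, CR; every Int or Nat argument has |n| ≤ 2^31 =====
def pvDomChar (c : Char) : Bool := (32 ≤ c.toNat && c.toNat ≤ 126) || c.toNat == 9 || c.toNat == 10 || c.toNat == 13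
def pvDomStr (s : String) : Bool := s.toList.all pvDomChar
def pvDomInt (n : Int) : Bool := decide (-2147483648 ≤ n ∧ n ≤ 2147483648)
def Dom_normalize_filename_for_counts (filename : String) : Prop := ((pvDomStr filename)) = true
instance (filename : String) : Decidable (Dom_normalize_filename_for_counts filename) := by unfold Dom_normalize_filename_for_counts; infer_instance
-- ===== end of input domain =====

-- B replaces A's two staged strip loops by one longest-match scan over the precomputed
-- product table of combined [compression][encryption] suffixes, slicing once (objective: alternative, same cost).

-- ===== PORT A =====
def normalize_filename_for_counts (filename : String) : String :=
  -- f = filename or ""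
  let f := if filename = "" then "" else filename
  -- encryption loop unrolled (tuple of two suffixes, break after the first hit)
  let f :=
    if PySem.Str.endswith (PySem.Str.lower f) ".gpg" then PySem.Str.slice f none (some (-4))
    else if PySem.Str.endswith (PySem.Str.lower f) ".pgp" then PySem.Str.slice f none (some (-4))
    else f
  -- compression loop unrolled (tuple of three suffixes, break after the first hit)
  if PySem.Str.endswith (PySem.Str.lower f) ".gz" then PySem.Str.slice f none (some (-3))
  else if PySem.Str.endswith (PySem.Str.lower f) ".bz2" then PySem.Str.slice f none (some (-4))
  else if PySem.Str.endswith (PySem.Str.lower f) ".zip" then PySem.Str.slice f none (some (-4))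
  else f

-- ===== PORT B =====
-- the 'for suf in _COMBINED_SUFFIXES: if low.endswith(suf): return …' loop of Source B
def pvStripLoop (f : String) (low : String) : List String → String
  | [] => f
  | suf :: rest =>
    if PySem.Str.endswith low suf then
      PySem.Str.slice f none (some ((PySem.Str.len f : Int) - (PySem.Str.len suf : Int)))
    else pvStripLoop f low rest

def normalize_filename_for_counts_alt (filename : String) : String :=
  -- f = filename or ""
  let f := if filename = "" then "" else filename
  let low := PySem.Str.lower f
  pvStripLoop f low
    [".bz2.gpg", ".bz2.pgp", ".zip.gpg", ".zip.pgp", ".gz.gpg", ".gz.pgp",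
     ".bz2", ".zip", ".gpg", ".pgp", ".gz"]

-- ===== PRECONDITION & SPEC =====
def Spec_normalize_filename_for_counts (filename : String) (out : String) : Prop := out = normalize_filename_for_counts_alt filename
instance (filename : String) (out : String) : Decidable (Spec_normalize_filename_for_counts filename out) := by unfold Spec_normalize_filename_for_counts; infer_instance

-- ===== CLAIM (what is proved, stated in full; the proofs are below) =====
def Claim_equal_normalize_filename_for_counts : Prop := ∀ (filename : String), Dom_normalize_filename_for_counts filename → Spec_normalize_filename_for_counts filename (normalize_filename_for_counts filename)

-- ===== LEMMAS AND PROOFS =====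

theorem suffix_len_le {l p : List Char} (h : PySem.Chars.endswith l p = true) :
    p.length ≤ l.length := ((PySem.Chars.endswith_iff l p).mp h).length_le

theorem length_lower (l : List Char) : (PySem.Chars.lower l).length = l.length := by
  simp [PySem.Chars.lower]

theorem lower_take (l : List Char) (k : Nat) :
    PySem.Chars.lower (l.take k) = (PySem.Chars.lower l).take k := by
  simp [PySem.Chars.lower]

theorem slice_len_sub (s : String) (k : Nat) (hk : k ≤ s.toList.length) :
    (PySem.Str.slice s none (some ((s.toList.length : Int) - (k : Int)))).toList
      = s.toList.take (s.toList.length - k) := by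
  have h : ((s.toList.length : Int) - (k : Int)) = ((s.toList.length - k : Nat) : Int) := by omega
  rw [h]; simp [pysem]

theorem sliceNeg4 (s : String) :
    (PySem.Str.slice s none (some (-4))).toList = s.toList.take (s.toList.length - 4) := by
  simp [pysem]

theorem sliceNeg3 (s : String) :
    (PySem.Str.slice s none (some (-3))).toList = s.toList.take (s.toList.length - 3) := by
  simp [pysem]

-- a suffix check against a concatenated pattern splits into two staged checks
theorem endswith_append_split (L a b : List Char) :
    PySem.Chars.endswith L (a ++ b)
      = (PySem.Chars.endswith L b && PySem.Chars.endswith (L.take (L.length - b.length)) a) := by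
  rw [Bool.eq_iff_iff]
  simp only [Bool.and_eq_true, PySem.Chars.endswith_iff]
  constructor
  · intro h
    obtain ⟨t, ht⟩ := h
    have hb : b <:+ L := ⟨t ++ a, by simpa [List.append_assoc] using ht⟩
    refine ⟨hb, ?_⟩
    have htake : L.take (L.length - b.length) = t ++ a := by
      subst ht
      have : (t ++ (a ++ b)).length - b.length = (t ++ a).length := by
        simp [List.length_append]; omega
      rw [this, ← List.append_assoc, List.take_left]
    rw [htake]; exact ⟨t, rfl⟩
  · rintro ⟨⟨u, hu⟩, ha⟩
    have hutake : L.take (L.length - b.length) = u := by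
      subst hu
      have : (u ++ b).length - b.length = u.length := by simp [List.length_append]
      rw [this, List.take_left]
    rw [hutake] at ha
    obtain ⟨v, hv⟩ := ha
    exact ⟨v, by rw [← hu, ← hv, List.append_assoc]⟩

-- two suffixes of the same list are nested by length
theorem suffix_suffix {l p q : List Char} (hp : p <:+ l) (hq : q <:+ l)
    (h : p.length ≤ q.length) : p <:+ q := by
  obtain ⟨u, hu⟩ := hp
  obtain ⟨v, hv⟩ := hq
  have hpl : p.length ≤ l.length := by rw [← hu]; simp
  have hql : q.length ≤ l.length := by rw [← hv]; simp
  have hpd : p = l.drop (l.length - p.length) := by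
    rw [← hu]; simp [List.length_append]
  have hqd : q = l.drop (l.length - q.length) := by
    rw [← hv]; simp [List.length_append]
  have hsplit : l.length - p.length = (l.length - q.length) + (q.length - p.length) := by omega
  rw [hpd, hsplit, ← List.drop_drop, ← hqd]
  exact List.drop_suffix _ _

-- two incompatible suffix patterns cannot both match
theorem endsw_excl {l p q : List Char}
    (hp : PySem.Chars.endswith l p = true) (hq : PySem.Chars.endswith l q = true)
    (hlen : p.length ≤ q.length) (hns : ¬ p <:+ q) : False :=
  hns (suffix_suffix ((PySem.Chars.endswith_iff l p).mp hp)
        ((PySem.Chars.endswith_iff l q).mp hq) hlen)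

-- ===== VERDICT (by name: the statement is the Claim_ definition above) =====
set_option maxHeartbeats 1600000 in
theorem normalize_filename_for_counts_spec : Claim_equal_normalize_filename_for_counts := by
  intro s _
  show normalize_filename_for_counts s = normalize_filename_for_counts_alt s
  unfold normalize_filename_for_counts normalize_filename_for_counts_alt
  simp only [pvStripLoop]
  have hor : (if s = "" then "" else s) = s := by split <;> simp_all
  simp only [hor]
  apply String.toList_inj.mp
  have len3 : ((".gz" : String).toList).length = 3 := by decide
  have len4a : ((".gpg" : String).toList).length = 4 := by decide
  have len4b : ((".pgp" : String).toList).length = 4 := by decide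
  have len4c : ((".bz2" : String).toList).length = 4 := by decide
  have len4d : ((".zip" : String).toList).length = 4 := by decide
  have len7a : ((".gz.gpg" : String).toList).length = 7 := by decide
  have len7b : ((".gz.pgp" : String).toList).length = 7 := by decide
  have len8a : ((".bz2.gpg" : String).toList).length = 8 := by decide
  have len8b : ((".bz2.pgp" : String).toList).length = 8 := by decide
  have len8c : ((".zip.gpg" : String).toList).length = 8 := by decide
  have len8d : ((".zip.pgp" : String).toList).length = 8 := by decide
  have es1 : PySem.Chars.endswith (PySem.Chars.lower s.toList) ((".bz2.gpg" : String).toList)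
      = (PySem.Chars.endswith (PySem.Chars.lower s.toList) ((".gpg" : String).toList)
          && PySem.Chars.endswith ((PySem.Chars.lower s.toList).take (s.toList.length - 4)) ((".bz2" : String).toList)) := by
    rw [(by decide : (".bz2.gpg" : String).toList = (".bz2" : String).toList ++ (".gpg" : String).toList),
        endswith_append_split, len4a, length_lower]
  have es2 : PySem.Chars.endswith (PySem.Chars.lower s.toList) ((".bz2.pgp" : String).toList)
      = (PySem.Chars.endswith (PySem.Chars.lower s.toList) ((".pgp" : String).toList)
          && PySem.Chars.endswith ((PySem.Chars.lower s.toList).take (s.toList.length - 4)) ((".bz2" : String).toList)) := by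
    rw [(by decide : (".bz2.pgp" : String).toList = (".bz2" : String).toList ++ (".pgp" : String).toList),
        endswith_append_split, len4b, length_lower]
  have es3 : PySem.Chars.endswith (PySem.Chars.lower s.toList) ((".zip.gpg" : String).toList)
      = (PySem.Chars.endswith (PySem.Chars.lower s.toList) ((".gpg" : String).toList)
          && PySem.Chars.endswith ((PySem.Chars.lower s.toList).take (s.toList.length - 4)) ((".zip" : String).toList)) := by
    rw [(by decide : (".zip.gpg" : String).toList = (".zip" : String).toList ++ (".gpg" : String).toList),
        endswith_append_split, len4a, length_lower]
  have es4 : PySem.Chars.endswith (PySem.Chars.lower s.toList) ((".zip.pgp" : String).toList)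
      = (PySem.Chars.endswith (PySem.Chars.lower s.toList) ((".pgp" : String).toList)
          && PySem.Chars.endswith ((PySem.Chars.lower s.toList).take (s.toList.length - 4)) ((".zip" : String).toList)) := by
    rw [(by decide : (".zip.pgp" : String).toList = (".zip" : String).toList ++ (".pgp" : String).toList),
        endswith_append_split, len4b, length_lower]
  have es5 : PySem.Chars.endswith (PySem.Chars.lower s.toList) ((".gz.gpg" : String).toList)
      = (PySem.Chars.endswith (PySem.Chars.lower s.toList) ((".gpg" : String).toList)
          && PySem.Chars.endswith ((PySem.Chars.lower s.toList).take (s.toList.length - 4)) ((".gz" : String).toList)) := by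
    rw [(by decide : (".gz.gpg" : String).toList = (".gz" : String).toList ++ (".gpg" : String).toList),
        endswith_append_split, len4a, length_lower]
  have es6 : PySem.Chars.endswith (PySem.Chars.lower s.toList) ((".gz.pgp" : String).toList)
      = (PySem.Chars.endswith (PySem.Chars.lower s.toList) ((".pgp" : String).toList)
          && PySem.Chars.endswith ((PySem.Chars.lower s.toList).take (s.toList.length - 4)) ((".gz" : String).toList)) := by
    rw [(by decide : (".gz.pgp" : String).toList = (".gz" : String).toList ++ (".pgp" : String).toList),
        endswith_append_split, len4b, length_lower]
  simp only [PySem.Str.endswith_eq, PySem.Str.toList_lower, PySem.Str.len_eq,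
    es1, es2, es3, es4, es5, es6, len3, len4a, len4b, len4c, len4d, len7a, len7b, len8a, len8b, len8c, len8d]
  -- abbreviations for readability of the script only
  by_cases hE1 : PySem.Chars.endswith (PySem.Chars.lower s.toList) ((".gpg" : String).toList) = true
  case pos =>
    have hn4 : 4 ≤ s.toList.length := by
      have h := suffix_len_le hE1; rw [length_lower, len4a] at h; exact h
    have hE2 : PySem.Chars.endswith (PySem.Chars.lower s.toList) ((".pgp" : String).toList) = false := by
      by_contra h
      exact endsw_excl hE1 (by simpa using h) (by decide) (by decide)
    have hD2 : PySem.Chars.endswith (PySem.Chars.lower s.toList) ((".bz2" : String).toList) = false := by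
      by_contra h
      exact endsw_excl (by simpa using h) hE1 (by decide) (by decide)
    have hD3 : PySem.Chars.endswith (PySem.Chars.lower s.toList) ((".zip" : String).toList) = false := by
      by_contra h
      exact endsw_excl (by simpa using h) hE1 (by decide) (by decide)
    simp only [hE1, hE2, hD2, hD3, if_true, Bool.true_and, Bool.false_and,
      Bool.false_eq_true, if_false, sliceNeg4, lower_take]
    by_cases hC1 : PySem.Chars.endswith ((PySem.Chars.lower s.toList).take (s.toList.length - 4)) ((".gz" : String).toList) = true
    case pos =>
      have hn7 : 7 ≤ s.toList.length := by
        have h := suffix_len_le hC1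
        rw [List.length_take, length_lower, len3] at h; omega
      have hC2 : PySem.Chars.endswith ((PySem.Chars.lower s.toList).take (s.toList.length - 4)) ((".bz2" : String).toList) = false := by
        by_contra h
        exact endsw_excl hC1 (by simpa using h) (by decide) (by decide)
      have hC3 : PySem.Chars.endswith ((PySem.Chars.lower s.toList).take (s.toList.length - 4)) ((".zip" : String).toList) = false := by
        by_contra h
        exact endsw_excl hC1 (by simpa using h) (by decide) (by decide)
      simp only [hC1, hC2, hC3, if_true, Bool.false_eq_true, if_false]
      rw [sliceNeg3, slice_len_sub s 7 hn7, sliceNeg4]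
      simp only [List.length_take]
      rw [List.take_take]
      congr 1
      omega
    case neg =>
      have hC1' : PySem.Chars.endswith ((PySem.Chars.lower s.toList).take (s.toList.length - 4)) ((".gz" : String).toList) = false := by
        simpa using hC1
      by_cases hC2 : PySem.Chars.endswith ((PySem.Chars.lower s.toList).take (s.toList.length - 4)) ((".bz2" : String).toList) = true
      case pos =>
        have hn8 : 8 ≤ s.toList.length := by
          have h := suffix_len_le hC2
          rw [List.length_take, length_lower, len4c] at h; omega
        have hC3 : PySem.Chars.endswith ((PySem.Chars.lower s.toList).take (s.toList.length - 4)) ((".zip" : String).toList) = false := by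
          by_contra h
          exact endsw_excl hC2 (by simpa using h) (by decide) (by decide)
        simp only [hC1', hC2, hC3, if_true, Bool.false_eq_true, if_false]
        rw [slice_len_sub s 8 hn8, sliceNeg4, sliceNeg4]
        simp only [List.length_take]
        rw [List.take_take]
        congr 1
        omega
      case neg =>
        have hC2' : PySem.Chars.endswith ((PySem.Chars.lower s.toList).take (s.toList.length - 4)) ((".bz2" : String).toList) = false := by
          simpa using hC2
        by_cases hC3 : PySem.Chars.endswith ((PySem.Chars.lower s.toList).take (s.toList.length - 4)) ((".zip" : String).toList) = true
        case pos =>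
          have hn8 : 8 ≤ s.toList.length := by
            have h := suffix_len_le hC3
            rw [List.length_take, length_lower, len4d] at h; omega
          simp only [hC1', hC2', hC3, if_true, Bool.false_eq_true, if_false]
          rw [slice_len_sub s 8 hn8, sliceNeg4, sliceNeg4]
          simp only [List.length_take]
          rw [List.take_take]
          congr 1
          omega
        case neg =>
          have hC3' : PySem.Chars.endswith ((PySem.Chars.lower s.toList).take (s.toList.length - 4)) ((".zip" : String).toList) = false := by
            simpa using hC3
          simp only [hC1', hC2', hC3', Bool.false_eq_true, if_false]
          rw [slice_len_sub s 4 hn4, sliceNeg4]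
  case neg =>
    have hE1' : PySem.Chars.endswith (PySem.Chars.lower s.toList) ((".gpg" : String).toList) = false := by
      simpa using hE1
    by_cases hE2 : PySem.Chars.endswith (PySem.Chars.lower s.toList) ((".pgp" : String).toList) = true
    case pos =>
      have hn4 : 4 ≤ s.toList.length := by
        have h := suffix_len_le hE2; rw [length_lower, len4b] at h; exact h
      have hD2 : PySem.Chars.endswith (PySem.Chars.lower s.toList) ((".bz2" : String).toList) = false := by
        by_contra h
        exact endsw_excl (by simpa using h) hE2 (by decide) (by decide)
      have hD3 : PySem.Chars.endswith (PySem.Chars.lower s.toList) ((".zip" : String).toList) = false := by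
        by_contra h
        exact endsw_excl (by simpa using h) hE2 (by decide) (by decide)
      simp only [hE1', hE2, hD2, hD3, if_true, Bool.true_and, Bool.false_and,
        Bool.false_eq_true, if_false, sliceNeg4, lower_take]
      by_cases hC1 : PySem.Chars.endswith ((PySem.Chars.lower s.toList).take (s.toList.length - 4)) ((".gz" : String).toList) = true
      case pos =>
        have hn7 : 7 ≤ s.toList.length := by
          have h := suffix_len_le hC1
          rw [List.length_take, length_lower, len3] at h; omega
        have hC2 : PySem.Chars.endswith ((PySem.Chars.lower s.toList).take (s.toList.length - 4)) ((".bz2" : String).toList) = false := by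
          by_contra h
          exact endsw_excl hC1 (by simpa using h) (by decide) (by decide)
        have hC3 : PySem.Chars.endswith ((PySem.Chars.lower s.toList).take (s.toList.length - 4)) ((".zip" : String).toList) = false := by
          by_contra h
          exact endsw_excl hC1 (by simpa using h) (by decide) (by decide)
        simp only [hC1, hC2, hC3, if_true, Bool.false_eq_true, if_false]
        rw [sliceNeg3, slice_len_sub s 7 hn7, sliceNeg4]
        simp only [List.length_take]
        rw [List.take_take]
        congr 1
        omega
      case neg =>
        have hC1' : PySem.Chars.endswith ((PySem.Chars.lower s.toList).take (s.toList.length - 4)) ((".gz" : String).toList) = false := by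
          simpa using hC1
        by_cases hC2 : PySem.Chars.endswith ((PySem.Chars.lower s.toList).take (s.toList.length - 4)) ((".bz2" : String).toList) = true
        case pos =>
          have hn8 : 8 ≤ s.toList.length := by
            have h := suffix_len_le hC2
            rw [List.length_take, length_lower, len4c] at h; omega
          have hC3 : PySem.Chars.endswith ((PySem.Chars.lower s.toList).take (s.toList.length - 4)) ((".zip" : String).toList) = false := by
            by_contra h
            exact endsw_excl hC2 (by simpa using h) (by decide) (by decide)
          simp only [hC1', hC2, hC3, if_true, Bool.false_eq_true, if_false]
          rw [slice_len_sub s 8 hn8, sliceNeg4, sliceNeg4]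
          simp only [List.length_take]
          rw [List.take_take]
          congr 1
          omega
        case neg =>
          have hC2' : PySem.Chars.endswith ((PySem.Chars.lower s.toList).take (s.toList.length - 4)) ((".bz2" : String).toList) = false := by
            simpa using hC2
          by_cases hC3 : PySem.Chars.endswith ((PySem.Chars.lower s.toList).take (s.toList.length - 4)) ((".zip" : String).toList) = true
          case pos =>
            have hn8 : 8 ≤ s.toList.length := by
              have h := suffix_len_le hC3
              rw [List.length_take, length_lower, len4d] at h; omega
            simp only [hC1', hC2', hC3, if_true, Bool.false_eq_true, if_false]
            rw [slice_len_sub s 8 hn8, sliceNeg4, sliceNeg4]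
            simp only [List.length_take]
            rw [List.take_take]
            congr 1
            omega
          case neg =>
            have hC3' : PySem.Chars.endswith ((PySem.Chars.lower s.toList).take (s.toList.length - 4)) ((".zip" : String).toList) = false := by
              simpa using hC3
            simp only [hC1', hC2', hC3', Bool.false_eq_true, if_false]
            rw [slice_len_sub s 4 hn4, sliceNeg4]
    case neg =>
      have hE2' : PySem.Chars.endswith (PySem.Chars.lower s.toList) ((".pgp" : String).toList) = false := by
        simpa using hE2
      simp only [hE1', hE2', Bool.false_and, Bool.false_eq_true, if_false]
      by_cases hD2 : PySem.Chars.endswith (PySem.Chars.lower s.toList) ((".bz2" : String).toList) = true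
      case pos =>
        have hn4 : 4 ≤ s.toList.length := by
          have h := suffix_len_le hD2; rw [length_lower, len4c] at h; exact h
        have hD1 : PySem.Chars.endswith (PySem.Chars.lower s.toList) ((".gz" : String).toList) = false := by
          by_contra h
          exact endsw_excl (by simpa using h) hD2 (by decide) (by decide)
        simp only [hD1, hD2, if_true, Bool.false_eq_true, if_false]
        rw [slice_len_sub s 4 hn4, sliceNeg4]
      case neg =>
        have hD2' : PySem.Chars.endswith (PySem.Chars.lower s.toList) ((".bz2" : String).toList) = false := by
          simpa using hD2
        by_cases hD3 : PySem.Chars.endswith (PySem.Chars.lower s.toList) ((".zip" : String).toList) = true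
        case pos =>
          have hn4 : 4 ≤ s.toList.length := by
            have h := suffix_len_le hD3; rw [length_lower, len4d] at h; exact h
          have hD1 : PySem.Chars.endswith (PySem.Chars.lower s.toList) ((".gz" : String).toList) = false := by
            by_contra h
            exact endsw_excl (by simpa using h) hD3 (by decide) (by decide)
          simp only [hD1, hD2', hD3, if_true, Bool.false_eq_true, if_false]
          rw [slice_len_sub s 4 hn4, sliceNeg4]
        case neg =>
          have hD3' : PySem.Chars.endswith (PySem.Chars.lower s.toList) ((".zip" : String).toList) = false := by
            simpa using hD3
          by_cases hD1 : PySem.Chars.endswith (PySem.Chars.lower s.toList) ((".gz" : String).toList) = true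
          case pos =>
            have hn3 : 3 ≤ s.toList.length := by
              have h := suffix_len_le hD1; rw [length_lower, len3] at h; exact h
            simp only [hD1, hD2', hD3', if_true, Bool.false_eq_true, if_false]
            rw [slice_len_sub s 3 hn3, sliceNeg3]
          case neg =>
            have hD1' : PySem.Chars.endswith (PySem.Chars.lower s.toList) ((".gz" : String).toList) = false := by
              simpa using hD1
            simp only [hD1', hD2', hD3', Bool.false_eq_true, if_false]
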